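-- pv_equiv track=rewrite | github.com/vankerkhove/jobs_app | app/parse_job_list.py | count_leading_tabs
-- ===== SOURCE A (Python) =====
-- def count_leading_tabs(text):
--     count = 0
--     for char in text:
--         if char == '\t':
--             count += 1
--         else:
--             break
--     return count
-- ===== SOURCE B (Python) =====
-- def count_leading_tabs(text):
--     return len(text) - len(text.lstrip('\t'))
-- ===== Notes on version B (the rewrite author's own statement) =====
-- stated objective: idiomatic
-- what changed: Replaces the explicit counting loop with the closed-form len(text) - len(text.lstrip('\t')), counting the stripped tabs by length difference with no loop or branching.
import Mathlib
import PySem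

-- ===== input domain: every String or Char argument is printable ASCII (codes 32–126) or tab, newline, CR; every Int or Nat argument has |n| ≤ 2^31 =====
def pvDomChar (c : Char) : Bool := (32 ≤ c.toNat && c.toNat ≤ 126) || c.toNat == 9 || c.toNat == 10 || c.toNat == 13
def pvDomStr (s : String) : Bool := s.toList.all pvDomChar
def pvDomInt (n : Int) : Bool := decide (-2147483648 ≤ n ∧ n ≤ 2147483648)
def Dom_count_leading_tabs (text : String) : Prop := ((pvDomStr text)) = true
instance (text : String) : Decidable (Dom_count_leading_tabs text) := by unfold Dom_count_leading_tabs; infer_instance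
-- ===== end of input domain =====

-- B: counts leading tabs as len(text) - len(text.lstrip('\t')) instead of an explicit loop (idiomatic one-liner).


-- ===== PORT A =====
-- the for-loop with break: count leading '\t' characters, stop at the first other char
def countLoopA : List Char → Int → Int
  | [], count => count
  | c :: rest, count => if c == '\t' then countLoopA rest (count + 1) else count

def count_leading_tabs (text : String) : Int := countLoopA text.toList 0

-- ===== PORT B =====
-- lstrip('\t') ported by hand as dropWhile (· == '\t') on the char list — exact for a single-char strip set
def count_leading_tabs_alt (text : String) : Int :=
  (text.toList.length : Int) - ((text.toList.dropWhile (fun c => c == '\t')).length : Int)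

-- ===== PRECONDITION & SPEC =====
def Spec_count_leading_tabs (text : String) (out : Int) : Prop := out = count_leading_tabs_alt text
instance (text : String) (out : Int) : Decidable (Spec_count_leading_tabs text out) := by unfold Spec_count_leading_tabs; infer_instance

-- ===== CLAIM (what is proved, stated in full; the proofs are below) =====
def Claim_equal_count_leading_tabs : Prop := ∀ (text : String), Dom_count_leading_tabs text → Spec_count_leading_tabs text (count_leading_tabs text)

-- ===== LEMMAS AND PROOFS =====
theorem countLoopA_eq (cs : List Char) (count : Int) :
    countLoopA cs count = count + ((cs.takeWhile (fun c => c == '\t')).length : Int) := by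
  induction cs generalizing count with
  | nil => simp [countLoopA]
  | cons c rest ih =>
    by_cases h : c == '\t'
    · simp [countLoopA, h, ih, List.takeWhile]
      ring
    · simp [countLoopA, h, List.takeWhile]

-- ===== VERDICT (by name: the statement is the Claim_ definition above) =====
theorem count_leading_tabs_spec : Claim_equal_count_leading_tabs := by
  intro text _
  unfold Spec_count_leading_tabs count_leading_tabs count_leading_tabs_alt
  rw [countLoopA_eq]
  have h : (text.toList.takeWhile (fun c => c == '\t')).length + (text.toList.dropWhile (fun c => c == '\t')).length = text.toList.length := by
    rw [← List.length_append, List.takeWhile_append_dropWhile]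
  omega
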